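-- pv_equiv track=rewrite | github.com/asmundur31/LoadManagementBackend | trampette_analysis/ml/models/jump_count_model.py | get_jump_ranges
-- ===== SOURCE A (Python) =====
-- def get_jump_ranges(label_array):
--     """
--     Finds consecutive jump intervals (where label == 1)
--     Returns a list of tuples: (start_index, end_index)
--     """
--     from itertools import groupby
--     from operator import itemgetter
--
--     ones = [i for i, val in enumerate(label_array) if val == 1]
--     if not ones:
--         return []
--
--     # Group consecutive indices
--     ranges = []
--     for k, g in groupby(enumerate(ones), lambda x: x[0] - x[1]):
--         group = list(map(itemgetter(1), g))
--         ranges.append((group[0], group[-1]))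
--     return ranges
-- ===== SOURCE B (Python) =====
-- def get_jump_ranges(label_array):
--     """
--     Finds consecutive jump intervals (where label == 1)
--     Returns a list of tuples: (start_index, end_index)
--     """
--     ranges = []
--     start = None
--     for i, val in enumerate(label_array):
--         if val == 1:
--             if start is None:
--                 start = i
--         else:
--             if start is not None:
--                 ranges.append((start, i - 1))
--                 start = None
--     if start is not None:
--         ranges.append((start, len(label_array) - 1))
--     return ranges
-- ===== Notes on version B (the rewrite author's own statement) =====
-- stated objective: simpler
-- what changed: Replaces the two-pass filter + itertools.groupby-on-index-offset construction with a single linear scan that tracks the start of the current run of 1-labels and flushes it when the run ends (or at end of input).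
import Mathlib
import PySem

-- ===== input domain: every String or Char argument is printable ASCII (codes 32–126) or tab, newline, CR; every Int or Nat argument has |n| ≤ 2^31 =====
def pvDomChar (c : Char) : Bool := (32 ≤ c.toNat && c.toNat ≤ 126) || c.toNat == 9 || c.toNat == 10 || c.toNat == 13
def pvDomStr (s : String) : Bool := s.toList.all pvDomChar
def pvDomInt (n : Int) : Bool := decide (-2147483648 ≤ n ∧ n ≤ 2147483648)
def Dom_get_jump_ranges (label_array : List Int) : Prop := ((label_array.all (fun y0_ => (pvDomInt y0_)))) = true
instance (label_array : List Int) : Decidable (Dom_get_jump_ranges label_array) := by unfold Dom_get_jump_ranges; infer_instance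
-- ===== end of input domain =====

-- B replaces the filter + itertools.groupby(index-offset) construction by one linear scan
-- tracking the start of the current run of 1-labels (objective: simpler).

-- ===== PORT A =====
-- itertools.groupby: splits a list into maximal runs of elements with equal key
-- (here key = fst - snd, as in A's lambda x: x[0] - x[1]).
def pvGroupByKey : List (Int × Int) → List (List (Int × Int))
  | [] => []
  | x :: xs =>
    (x :: xs.takeWhile (fun p => p.1 - p.2 == x.1 - x.2))
      :: pvGroupByKey (xs.dropWhile (fun p => p.1 - p.2 == x.1 - x.2))
termination_by l => l.length
decreasing_by
  simp only [List.length_cons]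
  have := List.length_dropWhile_le (fun p => p.1 - p.2 == x.1 - x.2) xs
  omega

-- per-group: group = list(map(itemgetter(1), g)); (group[0], group[-1]).
-- groups produced by groupby are nonempty, so the defaults of headD/getLastD are never used.
def pvRangesOf (gs : List (List (Int × Int))) : List (Int × Int) :=
  gs.map (fun g => ((g.map Prod.snd).headD 0, (g.map Prod.snd).getLastD 0))

def get_jump_ranges (label_array : List Int) : List (Int × Int) :=
  let ones := ((PySem.List.enumerate label_array).filter (fun p => p.2 == 1)).map Prod.fst
  if ones.isEmpty then []
  else pvRangesOf (pvGroupByKey (PySem.List.enumerate ones))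

-- ===== PORT B =====
-- loop body of Source B (state = (ranges, start))
def pvStepB (st : List (Int × Int) × Option Int) (p : Int × Int) :
    List (Int × Int) × Option Int :=
  if p.2 == 1 then
    (st.1, match st.2 with | none => some p.1 | some s => some s)
  else
    match st.2 with
    | none => st
    | some s => (st.1 ++ [(s, p.1 - 1)], none)

def get_jump_ranges_alt (label_array : List Int) : List (Int × Int) :=
  let st := (PySem.List.enumerate label_array).foldl pvStepB ([], none)
  match st.2 with
  | none => st.1
  | some s => st.1 ++ [(s, (label_array.length : Int) - 1)]

-- ===== PRECONDITION & SPEC =====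
def Spec_get_jump_ranges (label_array : List Int) (out : List (Int × Int)) : Prop := out = get_jump_ranges_alt label_array
instance (label_array : List Int) (out : List (Int × Int)) : Decidable (Spec_get_jump_ranges label_array out) := by unfold Spec_get_jump_ranges; infer_instance

-- ===== CLAIM (what is proved, stated in full; the proofs are below) =====
def Claim_equal_get_jump_ranges : Prop := ∀ (label_array : List Int), Dom_get_jump_ranges label_array → Spec_get_jump_ranges label_array (get_jump_ranges label_array)

-- ===== LEMMAS AND PROOFS =====

lemma pvGroupByKey_cons (x : Int × Int) (xs : List (Int × Int)) :
    pvGroupByKey (x :: xs) =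
      (x :: xs.takeWhile (fun p => p.1 - p.2 == x.1 - x.2))
        :: pvGroupByKey (xs.dropWhile (fun p => p.1 - p.2 == x.1 - x.2)) := by
  rw [pvGroupByKey]

-- canonical form: maximal runs of consecutive integers in a list, as (first, last) pairs
def pvRunsGo (s e : Int) : List Int → List (Int × Int)
  | [] => [(s, e)]
  | y :: ys => if y = e + 1 then pvRunsGo s y ys else (s, e) :: pvRunsGo y y ys

def pvRuns : List Int → List (Int × Int)
  | [] => []
  | x :: xs => pvRunsGo x x xs

def pvOnesFrom (k : Int) (xs : List Int) : List Int :=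
  ((PySem.List.enumerate xs k).filter (fun p => p.2 == 1)).map Prod.fst

lemma pvOnesFrom_ge (k : Int) (xs : List Int) : ∀ y ∈ pvOnesFrom k xs, k ≤ y := by
  induction xs generalizing k with
  | nil => simp [pvOnesFrom, PySem.List.enumerate_nil]
  | cons x xs ih =>
    intro y hy
    simp only [pvOnesFrom, PySem.List.enumerate_cons, List.filter_cons] at hy
    by_cases hx : x == 1
    · simp [hx] at hy
      rcases hy with h | h
      · omega
      · have := ih (k + 1) y (by simpa [pvOnesFrom] using h); omega
    · simp [hx] at hy
      have := ih (k + 1) y (by simpa [pvOnesFrom] using hy); omega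

lemma pvG (xs : List Int) : ∀ (k s e : Int),
    pvRunsGo s e xs =
      (s, (((PySem.List.enumerate xs k).takeWhile
              (fun p => p.1 - p.2 == (k - 1) - e)).map Prod.snd).getLastD e)
        :: pvRangesOf (pvGroupByKey ((PySem.List.enumerate xs k).dropWhile
              (fun p => p.1 - p.2 == (k - 1) - e))) := by
  induction xs with
  | nil => intro k s e; simp [pvRunsGo, PySem.List.enumerate_nil, pvGroupByKey, pvRangesOf]
  | cons x xs ih =>
    intro k s e
    by_cases h : x = e + 1
    · have hc : (k - x == (k - 1) - e) = true := by simp; omega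
      have hk : (k - 1) - e = ((k + 1) - 1) - x := by omega
      rw [PySem.List.enumerate_cons, List.takeWhile_cons, List.dropWhile_cons]
      simp only [hc, if_true, List.map_cons, List.getLastD_cons]
      rw [pvRunsGo, if_pos h, hk]
      exact ih (k + 1) s x
    · have hc : (k - x == (k - 1) - e) = false := by simp; omega
      rw [PySem.List.enumerate_cons, List.takeWhile_cons, List.dropWhile_cons]
      simp only [hc, Bool.false_eq_true, if_false, List.map_nil, List.getLastD_nil]
      rw [pvRunsGo, if_neg h, pvGroupByKey_cons]
      have h2 := ih (k + 1) x x
      simp only [pvRangesOf, List.map_cons, List.headD_cons, List.getLastD_cons] at h2 ⊢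
      rw [List.cons.injEq]
      have hk : ((k, x).1 - (k, x).2 : Int) = ((k + 1) - 1) - x := by simp
      rw [hk, h2]
      simp

lemma pvAtop (xs : List Int) (k : Int) :
    pvRangesOf (pvGroupByKey (PySem.List.enumerate xs k)) = pvRuns xs := by
  cases xs with
  | nil => simp [PySem.List.enumerate_nil, pvGroupByKey, pvRangesOf, pvRuns]
  | cons x xs =>
    rw [PySem.List.enumerate_cons, pvGroupByKey_cons, pvRuns]
    have h2 := pvG xs (k + 1) x x
    simp only [pvRangesOf, List.map_cons, List.headD_cons, List.getLastD_cons] at h2 ⊢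
    have hk : ((k, x).1 - (k, x).2 : Int) = ((k + 1) - 1) - x := by simp
    rw [hk, h2]

def pvFinishB (st : List (Int × Int) × Option Int) (last : Int) : List (Int × Int) :=
  match st.2 with
  | none => st.1
  | some s => st.1 ++ [(s, last)]

-- B-side invariant: the scan from either state produces the runs of the remaining 1-indices
lemma pvBboth (xs : List Int) : ∀ (k : Int) (acc : List (Int × Int)),
    (pvFinishB ((PySem.List.enumerate xs k).foldl pvStepB (acc, none)) (k + xs.length - 1)
       = acc ++ pvRuns (pvOnesFrom k xs))
    ∧ ∀ s, pvFinishB ((PySem.List.enumerate xs k).foldl pvStepB (acc, some s)) (k + xs.length - 1)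
       = acc ++ pvRunsGo s (k - 1) (pvOnesFrom k xs) := by
  induction xs with
  | nil =>
    intro k acc
    simp [PySem.List.enumerate_nil, pvFinishB, pvOnesFrom, pvRuns, pvRunsGo]
  | cons x xs ih =>
    intro k acc
    have hones : pvOnesFrom k (x :: xs) =
        (if (x == 1) = true then [k] else []) ++ pvOnesFrom (k + 1) xs := by
      simp only [pvOnesFrom, PySem.List.enumerate_cons, List.filter_cons]
      split <;> simp
    have hlen : k + ((x :: xs).length : Int) - 1 = (k + 1) + (xs.length : Int) - 1 := by
      simp; omega
    constructor
    · by_cases hx : x = 1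
      · have h1 : (x == 1) = true := by simp [hx]
        simp only [PySem.List.enumerate_cons, List.foldl_cons, pvStepB, hlen,
          hones, h1, if_true, List.cons_append, List.nil_append]
        rw [(ih (k + 1) acc).2 k]
        have : pvRuns (k :: pvOnesFrom (k + 1) xs)
            = pvRunsGo k ((k + 1) - 1) (pvOnesFrom (k + 1) xs) := by
          simp [pvRuns]
        rw [this]
      · have h1 : (x == 1) = false := by simp [hx]
        simp only [PySem.List.enumerate_cons, List.foldl_cons, pvStepB, hlen, hones, h1, Bool.false_eq_true, if_false, List.nil_append]
        exact (ih (k + 1) acc).1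
    · intro s
      by_cases hx : x = 1
      · have h1 : (x == 1) = true := by simp [hx]
        simp only [PySem.List.enumerate_cons, List.foldl_cons, pvStepB, hlen,
          hones, h1, if_true, List.cons_append, List.nil_append]
        rw [(ih (k + 1) acc).2 s]
        have : pvRunsGo s (k - 1) (k :: pvOnesFrom (k + 1) xs)
            = pvRunsGo s ((k + 1) - 1) (pvOnesFrom (k + 1) xs) := by
          rw [pvRunsGo]; rw [if_pos (by omega)]; norm_num
        rw [this]
      · have h1 : (x == 1) = false := by simp [hx]
        simp only [PySem.List.enumerate_cons, List.foldl_cons, pvStepB, hlen, hones, h1, Bool.false_eq_true, if_false, List.nil_append]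
        rw [(ih (k + 1) (acc ++ [(s, k - 1)])).1, List.append_assoc]
        congr 1
        cases ho : pvOnesFrom (k + 1) xs with
        | nil => simp [pvRuns, pvRunsGo]
        | cons y ys =>
          have hy : k + 1 ≤ y := pvOnesFrom_ge (k + 1) xs y (by rw [ho]; simp)
          rw [pvRunsGo, if_neg (by omega)]
          simp [pvRuns]

lemma pvB_eq_runs (l : List Int) : get_jump_ranges_alt l = pvRuns (pvOnesFrom 0 l) := by
  have := (pvBboth l 0 []).1
  simpa [pvFinishB, get_jump_ranges_alt] using this

lemma pvA_eq_runs (l : List Int) : get_jump_ranges l = pvRuns (pvOnesFrom 0 l) := by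
  unfold get_jump_ranges
  cases h : ((PySem.List.enumerate l).filter (fun p => p.2 == 1)).map Prod.fst with
  | nil =>
    have : pvOnesFrom 0 l = [] := by simpa [pvOnesFrom] using h
    simp [this, pvRuns]
  | cons o os =>
    have hne : (o :: os).isEmpty = false := rfl
    have : pvOnesFrom 0 l = o :: os := by simpa [pvOnesFrom] using h
    simp only [hne, Bool.false_eq_true, if_false, this]
    exact pvAtop (o :: os) 0

-- ===== VERDICT (by name: the statement is the Claim_ definition above) =====
theorem get_jump_ranges_spec : Claim_equal_get_jump_ranges := by
  intro l _
  unfold Spec_get_jump_ranges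
  rw [pvA_eq_runs, pvB_eq_runs]
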